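-- pv_equiv track=rewrite | github.com/a-kenji/nvcheckhealth | nvcheckhealth.py | create_headers
-- ===== SOURCE A (Python) =====
-- def strip_lines(_lines):
--     new_lines = []
--     for _line in _lines:
--         if _line.strip():
--             new_lines.append(_line.strip())
--     return new_lines
--
-- def is_separator(_line):
--     for char in _line:
--         if char != "=":
--             return False
--     return True
--
-- def create_headers(_lines):
--     headers = []
--     _header = ""
--     prev_line = ""
--     for _line in strip_lines(_lines):
--         if is_separator(_line):
--             _header = prev_line
--         else:
--             if _header:
--                 headers.append((_header, _line))
--             prev_line = _line
--     return headers
-- ===== SOURCE B (Python) =====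
-- def create_headers(_lines):
--     stripped = [s for s in (x.strip() for x in _lines) if s]
--     # split into segments of non-separator lines (separators are the cut points)
--     segments, cur = [], []
--     for s in stripped:
--         if all(c == "=" for c in s):
--             segments.append(cur)
--             cur = []
--         else:
--             cur.append(s)
--     segments.append(cur)
--     first, rest = segments[0], segments[1:]
--     last = first[-1] if first else ""
--     out = []
--     for seg in rest:
--         if last:
--             out.extend((last, s) for s in seg)
--         if seg:
--             last = seg[-1]
--     return out
-- ===== Notes on version B (the rewrite author's own statement) =====
-- stated objective: alternative
-- what changed: Replaced A's single-pass state machine carrying _header/prev_line across lines by a two-phase decomposition: split the stripped lines into segments at separator lines, then emit each segment's lines paired with the last line of the preceding non-empty segment.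
import Mathlib
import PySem

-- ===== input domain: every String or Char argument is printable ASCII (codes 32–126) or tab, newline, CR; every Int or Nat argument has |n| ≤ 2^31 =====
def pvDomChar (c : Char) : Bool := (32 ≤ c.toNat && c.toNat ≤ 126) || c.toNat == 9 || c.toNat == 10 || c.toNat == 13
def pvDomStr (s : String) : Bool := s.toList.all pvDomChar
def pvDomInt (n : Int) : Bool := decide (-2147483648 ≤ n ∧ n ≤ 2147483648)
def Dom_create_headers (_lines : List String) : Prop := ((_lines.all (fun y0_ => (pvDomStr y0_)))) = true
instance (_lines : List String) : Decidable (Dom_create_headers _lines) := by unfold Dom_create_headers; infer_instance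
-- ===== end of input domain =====

-- B replaces A's single-pass header/prev state machine by a split-into-segments-then-emit
-- decomposition (alternative, same cost); the return values are proved equal on all inputs.

-- ===== PORT A =====
def strip_lines (_lines : List String) : List String :=
  _lines.foldl (fun new_lines _line =>
    if PySem.Str.strip _line ≠ "" then new_lines ++ [PySem.Str.strip _line] else new_lines) []

def is_separator (_line : String) : Bool :=
  -- for char in _line: if char != '=': return False / return True
  _line.toList.all (fun c => c == '=')

-- loop body of A's for-loop; state = (headers, _header, prev_line)
def stepA (st : List (String × String) × String × String) (_line : String) :
    List (String × String) × String × String :=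
  if is_separator _line then (st.1, st.2.2, st.2.2)
  else if st.2.1 ≠ "" then (st.1 ++ [(st.2.1, _line)], st.2.1, _line)
  else (st.1, st.2.1, _line)

def create_headers (_lines : List String) : List (String × String) :=
  ((strip_lines _lines).foldl stepA ([], "", "")).1

-- ===== PORT B =====
def ch_is_sep_alt (s : String) : Bool := s.toList.all (fun c => c == '=')

-- loop body of B's splitting loop; state = (segments, cur)
def stepSplit (st : List (List String) × List String) (s : String) :
    List (List String) × List String :=
  if ch_is_sep_alt s then (st.1 ++ [st.2], []) else (st.1, st.2 ++ [s])

-- loop body of B's emission loop; state = (out, last)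
def stepEmit (st : List (String × String) × String) (seg : List String) :
    List (String × String) × String :=
  (if st.2 ≠ "" then st.1 ++ seg.map (fun s => (st.2, s)) else st.1,
   (seg.getLast?).getD st.2)

def create_headers_alt (_lines : List String) : List (String × String) :=
  let stripped := (_lines.map PySem.Str.strip).filter (fun s => s ≠ "")
  let sc := stripped.foldl stepSplit ([], [])
  let segments := sc.1 ++ [sc.2]
  match segments with
  | [] => []
  | first :: rest =>
    let last0 := (first.getLast?).getD ""
    (rest.foldl stepEmit ([], last0)).1

-- ===== PRECONDITION & SPEC =====
def Spec_create_headers (_lines : List String) (out : List (String × String)) : Prop := out = create_headers_alt _lines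
instance (_lines : List String) (out : List (String × String)) : Decidable (Spec_create_headers _lines out) := by unfold Spec_create_headers; infer_instance

-- ===== CLAIM (what is proved, stated in full; the proofs are below) =====
def Claim_equal_create_headers : Prop := ∀ (_lines : List String), Dom_create_headers _lines → Spec_create_headers _lines (create_headers _lines)

-- ===== LEMMAS AND PROOFS =====

-- the stripped list is the same on both sides
theorem strip_lines_eq (ls : List String) :
    strip_lines ls = (ls.map PySem.Str.strip).filter (fun s => s ≠ "") := by
  have h : ∀ (ls : List String) (acc : List String),
      ls.foldl (fun new_lines _line =>
        if PySem.Str.strip _line ≠ "" then new_lines ++ [PySem.Str.strip _line] else new_lines) acc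
      = acc ++ (ls.map PySem.Str.strip).filter (fun s => s ≠ "") := by
    intro ls
    induction ls with
    | nil => simp
    | cons l t ih =>
      intro acc
      rw [List.foldl_cons, List.map_cons, List.filter_cons]
      by_cases hl : PySem.Str.strip l = ""
      · rw [if_neg (by simpa using hl), ih]
        simp [hl]
      · rw [if_pos (by simpa using hl), ih]
        simp [hl]
  simpa [strip_lines] using h ls []

-- recursive reference for A's loop (output only; accumulator factored out)
def fRec : List String → String → String → List (String × String)
  | [], _, _ => []
  | l :: t, hdr, prev =>
    if is_separator l then fRec t prev prev
    else (if hdr ≠ "" then [(hdr, l)] else []) ++ fRec t hdr l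

theorem foldA_eq_fRec (L : List String) (acc : List (String × String)) (hdr prev : String) :
    (L.foldl stepA (acc, hdr, prev)).1 = acc ++ fRec L hdr prev := by
  induction L generalizing acc hdr prev with
  | nil => simp [fRec]
  | cons l t ih =>
    rw [List.foldl_cons]
    by_cases hs : is_separator l
    · rw [show stepA (acc, hdr, prev) l = (acc, prev, prev) from by simp [stepA, hs], ih]
      simp [fRec, hs]
    · by_cases hh : hdr = ""
      · rw [show stepA (acc, hdr, prev) l = (acc, hdr, l) from by simp [stepA, hs, hh], ih]
        simp [fRec, hs, hh]
      · rw [show stepA (acc, hdr, prev) l = (acc ++ [(hdr, l)], hdr, l) from by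
            simp [stepA, hs, hh], ih]
        simp [fRec, hs, hh]

-- recursive reference for B's segment splitting
def splitSegs : List String → List (List String)
  | [] => [[]]
  | l :: t =>
    if ch_is_sep_alt l then [] :: splitSegs t
    else
      match splitSegs t with
      | [] => [[l]]
      | s :: ss => (l :: s) :: ss

theorem splitSegs_ne_nil (L : List String) : splitSegs L ≠ [] := by
  cases L with
  | nil => simp [splitSegs]
  | cons l t =>
    simp only [splitSegs]
    split
    · simp
    · split <;> simp

-- prepend into the first segment
def consFirst (c : List String) : List (List String) → List (List String)
  | [] => [c]
  | s :: ss => (c ++ s) :: ss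

theorem foldSplit_eq (L : List String) (A : List (List String)) (c : List String) :
    (L.foldl stepSplit (A, c)).1 ++ [(L.foldl stepSplit (A, c)).2]
      = A ++ consFirst c (splitSegs L) := by
  induction L generalizing A c with
  | nil => simp [splitSegs, consFirst]
  | cons l t ih =>
    rw [List.foldl_cons]
    by_cases hs : ch_is_sep_alt l
    · rw [show stepSplit (A, c) l = (A ++ [c], []) from by simp [stepSplit, hs], ih]
      cases h : splitSegs t with
      | nil => exact absurd h (splitSegs_ne_nil t)
      | cons s ss => simp [splitSegs, hs, h, consFirst]
    · rw [show stepSplit (A, c) l = (A, c ++ [l]) from by simp [stepSplit, hs], ih]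
      cases h : splitSegs t with
      | nil => exact absurd h (splitSegs_ne_nil t)
      | cons s ss => simp [splitSegs, hs, h, consFirst]

-- recursive reference for B's emission loop
def emit : List (List String) → String → List (String × String)
  | [], _ => []
  | seg :: rest, last =>
    (if last ≠ "" then seg.map (fun s => (last, s)) else []) ++
      emit rest ((seg.getLast?).getD last)

theorem foldB_eq_emit (segs : List (List String)) (acc : List (String × String)) (last : String) :
    (segs.foldl stepEmit (acc, last)).1 = acc ++ emit segs last := by
  induction segs generalizing acc last with
  | nil => simp [emit]
  | cons seg rest ih =>
    rw [List.foldl_cons]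
    by_cases h : last = ""
    · rw [show stepEmit (acc, last) seg = (acc, (seg.getLast?).getD last) from by
          simp [stepEmit, h], ih]
      simp [emit, h]
    · rw [show stepEmit (acc, last) seg
          = (acc ++ seg.map (fun s => (last, s)), (seg.getLast?).getD last) from by
          simp [stepEmit, h], ih]
      simp [emit, h]

theorem getLast_cons_getD (l p : String) (s : List String) :
    ((l :: s).getLast?).getD p = (s.getLast?).getD l := by
  induction s generalizing l p with
  | nil => simp
  | cons a t ih => rw [List.getLast?_cons_cons, ih, ih]

-- the key correspondence between A's state machine and B's segment view
theorem fRec_eq_emit (L : List String) (hdr prev : String) :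
    fRec L hdr prev =
      (match splitSegs L with
       | [] => []
       | first :: rest =>
         (if hdr ≠ "" then first.map (fun s => (hdr, s)) else []) ++
           emit rest ((first.getLast?).getD prev)) := by
  induction L generalizing hdr prev with
  | nil => simp [fRec, splitSegs, emit]
  | cons l t ih =>
    by_cases hs : is_separator l
    · have hs' : ch_is_sep_alt l := hs
      rw [show fRec (l :: t) hdr prev = fRec t prev prev from by simp [fRec, hs], ih]
      rw [show splitSegs (l :: t) = [] :: splitSegs t from by simp [splitSegs, hs']]
      cases h : splitSegs t with
      | nil => exact absurd h (splitSegs_ne_nil t)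
      | cons f r => simp [emit]
    · have hs' : ¬ ch_is_sep_alt l := hs
      rw [show fRec (l :: t) hdr prev
          = (if hdr ≠ "" then [(hdr, l)] else []) ++ fRec t hdr l from by simp [fRec, hs], ih]
      cases h : splitSegs t with
      | nil => exact absurd h (splitSegs_ne_nil t)
      | cons f r =>
        rw [show splitSegs (l :: t) = (l :: f) :: r from by simp [splitSegs, hs', h]]
        simp only [getLast_cons_getD]
        by_cases hh : hdr = ""
        · simp [hh]
        · simp [hh]

-- ===== VERDICT (by name: the statement is the Claim_ definition above) =====
theorem create_headers_spec : Claim_equal_create_headers := by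
  intro _lines _hdom
  unfold Spec_create_headers create_headers create_headers_alt
  rw [strip_lines_eq]
  set L := (_lines.map PySem.Str.strip).filter (fun s => s ≠ "") with hL
  rw [foldA_eq_fRec, fRec_eq_emit]
  cases h : splitSegs L with
  | nil => exact absurd h (splitSegs_ne_nil L)
  | cons f r =>
    have hsplit : (L.foldl stepSplit ([], [])).1 ++ [(L.foldl stepSplit ([], [])).2] = f :: r := by
      rw [foldSplit_eq L [] [], h]
      simp [consFirst]
    simp only [List.nil_append]
    rw [hsplit]
    simp [foldB_eq_emit]
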